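-- pv_equiv track=rewrite | github.com/BartlomiejSzczukiewicz/homework | MOCKTEST3/MOCK3-2/p1.py | f
-- ===== SOURCE A (Python) =====
-- def f(n):
--     arr = []
--     arr2 = []
--     str_n = str(n)
--     for digit in str_n:
--         arr.append(digit)
--     for digit in arr:
--         if int(digit)%2 != 0:
--             arr2.append(int(digit))
--     if not arr2:
--         return -1
--     return max(arr2) - min(arr2)
-- ===== SOURCE B (Python) =====
-- def f(n):
--     odds = [int(d) for d in str(n) if int(d) % 2 != 0]
--     if not odds:
--         return -1
--     odds.sort()
--     return odds[-1] - odds[0]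
-- ===== Notes on version B (the rewrite author's own statement) =====
-- stated objective: simpler
-- what changed: Replaces the two appended-list loops plus max()/min() scans with a single comprehension and a sort-then-endpoints computation (sorted[-1] - sorted[0]).
import Mathlib
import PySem

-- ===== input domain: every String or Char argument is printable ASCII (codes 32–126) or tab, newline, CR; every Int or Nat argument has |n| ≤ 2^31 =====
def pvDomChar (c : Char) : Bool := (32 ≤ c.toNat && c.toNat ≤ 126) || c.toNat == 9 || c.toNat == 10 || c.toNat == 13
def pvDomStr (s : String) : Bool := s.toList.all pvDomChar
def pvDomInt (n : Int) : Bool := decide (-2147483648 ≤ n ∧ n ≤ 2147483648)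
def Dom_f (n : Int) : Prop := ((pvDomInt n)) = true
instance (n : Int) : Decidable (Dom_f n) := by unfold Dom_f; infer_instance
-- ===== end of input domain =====

-- B builds the odd-digit list with one comprehension and sorts it, returning last - first,
-- instead of A's two append loops plus separate max()/min() scans. (Same return values on 0 ≤ n.)


-- int(digit) for a single character of str(n); 0 is only returned where Python raises (outside Pre_f)
def pvDigitVal (d : Char) : Int := (PySem.Int.ofChars? [d]).getD 0

-- ===== PORT A =====
def f (n : Int) : Int :=
  let strN := PySem.Int.toChars n
  let arr := strN.foldl (fun acc digit => acc ++ [digit]) []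
  let arr2 := arr.foldl (fun acc digit =>
    if PySem.Int.mod (pvDigitVal digit) 2 ≠ 0 then acc ++ [pvDigitVal digit] else acc) []
  if arr2 = [] then -1
  else ((PySem.List.max? arr2 (fun x => x)).getD 0) - ((PySem.List.min? arr2 (fun x => x)).getD 0)

-- ===== PORT B =====
def f_alt (n : Int) : Int :=
  let odds := ((PySem.Int.toChars n).filter
      (fun d => PySem.Int.mod (pvDigitVal d) 2 ≠ 0)).map pvDigitVal
  if odds = [] then -1
  else
    let s := PySem.List.sorted odds (fun x => x) false
    ((PySem.List.pyGet? s (-1)).getD 0) - ((PySem.List.pyGet? s 0).getD 0)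

-- ===== PRECONDITION & SPEC =====
-- Pre_f excludes negative n, on which Python's int('-') raises ValueError in both A and B.
def Pre_f (n : Int) : Prop := 0 ≤ n
instance (n : Int) : Decidable (Pre_f n) := by unfold Pre_f; infer_instance
def pvWitness_f : Int := 13579

def Spec_f (n : Int) (out : Int) : Prop := out = f_alt n
instance (n : Int) (out : Int) : Decidable (Spec_f n out) := by unfold Spec_f; infer_instance

-- ===== CLAIM =====
def Claim_equal_f : Prop := ∀ (n : Int), Dom_f n → Pre_f n → Spec_f n (f n)

-- ===== LEMMAS AND PROOFS =====

-- max of a nonempty list = last element of its sorted order; min = first element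
theorem sorted_head_eq_min (L : List Int) (hL : L ≠ []) :
    (PySem.List.pyGet? (PySem.List.sorted L (fun x => x) false) 0).getD 0
      = (PySem.List.min? L (fun x => x)).getD 0 := by
  obtain ⟨m, hm⟩ : ∃ m, PySem.List.min? L (fun x => x) = some m := by
    cases h : PySem.List.min? L (fun x => x) with
    | none => exact absurd ((PySem.List.min?_eq_none_iff L _).mp h) hL
    | some m => exact ⟨m, rfl⟩
  rw [hm]
  cases hs : PySem.List.sorted L (fun x => x) false with
  | nil => exact absurd ((PySem.List.sorted_eq_nil_iff L _ _).mp hs) hL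
  | cons a t =>
    rw [PySem.List.pyGet?_zero_cons]
    have ha : a ∈ L := (PySem.List.mem_sorted L _ _ a).mp (by rw [hs]; exact List.mem_cons_self)
    have h1 : m ≤ a := PySem.List.min?_isMin hm a ha
    have h2 : a ≤ m := PySem.List.key_head_sorted_le L _ hs m (PySem.List.min?_mem hm)
    simp [le_antisymm h2 h1]

theorem sorted_last_eq_max (L : List Int) (hL : L ≠ []) :
    (PySem.List.pyGet? (PySem.List.sorted L (fun x => x) false) (-1)).getD 0
      = (PySem.List.max? L (fun x => x)).getD 0 := by
  obtain ⟨m, hm⟩ : ∃ m, PySem.List.max? L (fun x => x) = some m := by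
    cases h : PySem.List.max? L (fun x => x) with
    | none => exact absurd ((PySem.List.max?_eq_none_iff L _).mp h) hL
    | some m => exact ⟨m, rfl⟩
  rw [hm, PySem.List.pyGet?_neg_one]
  have hsne : PySem.List.sorted L (fun x => x) false ≠ [] :=
    fun h => hL ((PySem.List.sorted_eq_nil_iff L _ _).mp h)
  obtain ⟨a, ha⟩ := Option.isSome_iff_exists.mp (List.getLast?_isSome.mpr hsne)
  rw [ha]
  have haL : a ∈ L := (PySem.List.mem_sorted L _ _ a).mp (List.mem_of_getLast? ha)
  have h1 : a ≤ m := PySem.List.max?_isMax hm a haL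
  have hmL : m ∈ PySem.List.sorted L (fun x => x) false :=
    (PySem.List.mem_sorted L _ _ m).mpr (PySem.List.max?_mem hm)
  obtain ⟨i, hi, hgi⟩ := List.mem_iff_getElem.mp hmL
  have hlen : 0 < (PySem.List.sorted L (fun x => x) false).length := List.length_pos_iff.mpr hsne
  have hlast : (PySem.List.sorted L (fun x => x) false)[(PySem.List.sorted L (fun x => x) false).length - 1]'(by omega) = a := by
    have h' := List.getLast?_eq_getElem? (l := PySem.List.sorted L (fun x => x) false) ▸ ha
    rw [List.getElem?_eq_some_iff] at h'
    exact h'.2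
  have h2 : m ≤ a := by
    have hmono := PySem.List.sorted_id_getElem_mono L
      (p := i) (q := (PySem.List.sorted L (fun x => x) false).length - 1) (by omega) (by omega)
    rw [hgi, hlast] at hmono
    exact hmono
  simp [le_antisymm h1 h2]

-- ===== VERDICT =====
theorem f_spec : Claim_equal_f := by
  intro n _ _
  unfold Spec_f f f_alt
  simp only [PySem.List.foldl_append_singleton_eq_self, List.nil_append]
  rw [PySem.List.foldl_append_ite (p := fun d => PySem.Int.mod (pvDigitVal d) 2 ≠ 0)
        (f := pvDigitVal)]
  simp only [List.nil_append]
  set L := ((PySem.Int.toChars n).filter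
      (fun d => decide (PySem.Int.mod (pvDigitVal d) 2 ≠ 0))).map pvDigitVal with hLdef
  by_cases h : L = []
  · simp [h]
  · rw [if_neg h, if_neg h, sorted_last_eq_max L h, sorted_head_eq_min L h]
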